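-- pv_equiv track=rewrite | github.com/mksaint28/Advent_of_Code | 2017/day2/day2.py | evenDivide
-- ===== SOURCE A (Python) =====
-- def evenDivide(array):
--     div = []
--     for subarr in array:
--         for x in subarr:
--             for j in range(len(subarr)):
--                 if x!=subarr[j] and x%subarr[j] == 0:
--                     div.append(x//subarr[j])
--
--     return sum(div)
-- ===== SOURCE B (Python) =====
-- def evenDivide(array):
--     total = 0
--     for row in array:
--         counts = {}
--         for v in row:
--             counts[v] = counts.get(v, 0) + 1
--         for a, ca in counts.items():
--             for b, cb in counts.items():
--                 if a != b and a % b == 0: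
--                     total += (a // b) * ca * cb
--     return total
-- ===== Notes on version B (the rewrite author's own statement) =====
-- stated objective: alternative
-- what changed: B builds a per-row frequency map of values and sums (a//b)*count[a]*count[b] over ordered pairs of distinct values, instead of A's scan over all index pairs with a growing result list.
import Mathlib
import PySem

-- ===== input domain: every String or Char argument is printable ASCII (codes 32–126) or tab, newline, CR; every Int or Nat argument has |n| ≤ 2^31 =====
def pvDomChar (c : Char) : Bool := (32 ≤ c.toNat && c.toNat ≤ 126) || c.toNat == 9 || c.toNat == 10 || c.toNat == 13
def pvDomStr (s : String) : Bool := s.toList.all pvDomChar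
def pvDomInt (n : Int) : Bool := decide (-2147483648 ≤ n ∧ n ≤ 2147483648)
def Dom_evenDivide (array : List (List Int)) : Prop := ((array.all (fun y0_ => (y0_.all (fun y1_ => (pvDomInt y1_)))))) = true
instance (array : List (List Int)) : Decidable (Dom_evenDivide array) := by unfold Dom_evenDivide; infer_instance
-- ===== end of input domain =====

-- B replaces A's scan over all index pairs (appending each quotient to a list) by a per-row
-- frequency map, summing (a//b)*count[a]*count[b] over ordered pairs of distinct values (objective: alternative).


-- ===== PORT A =====
def evenDivide (array : List (List Int)) : Int :=
  let div : List Int :=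
    array.foldl (fun div subarr =>
      subarr.foldl (fun div x =>
        (PySem.List.pyRange 0 (subarr.length : Int) 1).foldl (fun div j =>
          if x ≠ PySem.List.pyGetD subarr j 0 ∧
             PySem.Int.mod x (PySem.List.pyGetD subarr j 0) = 0 then
            div ++ [PySem.Int.floordiv x (PySem.List.pyGetD subarr j 0)]
          else div) div) div) []
  div.sum

-- ===== PORT B =====
def evenDivide_alt (array : List (List Int)) : Int :=
  array.foldl (fun total row =>
    let counts : PySem.Dict Int Int :=
      row.foldl (fun c v => c.insert v (c.getD v 0 + 1)) PySem.Dict.empty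
    counts.items.foldl (fun total p =>
      counts.items.foldl (fun total q =>
        if p.1 ≠ q.1 ∧ PySem.Int.mod p.1 q.1 = 0 then
          total + PySem.Int.floordiv p.1 q.1 * p.2 * q.2
        else total) total) total) 0

-- ===== PRECONDITION & SPEC =====
-- Pre_ excludes exactly the rows mixing 0 with a nonzero value, where Python's x % 0 raises
-- ZeroDivisionError (in A and in B alike).
def Pre_evenDivide (array : List (List Int)) : Prop :=
  ∀ row ∈ array, (0 : Int) ∈ row → ∀ v ∈ row, v = 0
instance (array : List (List Int)) : Decidable (Pre_evenDivide array) := by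
  unfold Pre_evenDivide; infer_instance
def pvWitness_evenDivide : List (List Int) := [[5, 9, 2, 8], [9, 4, 7, 3], [3, 8, 6, 5]]
def Spec_evenDivide (array : List (List Int)) (out : Int) : Prop := out = evenDivide_alt array
instance (array : List (List Int)) (out : Int) : Decidable (Spec_evenDivide array out) := by
  unfold Spec_evenDivide; infer_instance

-- ===== CLAIM (what is proved, stated in full; the proofs are below) =====
def Claim_equal_evenDivide : Prop :=
  ∀ (array : List (List Int)), Dom_evenDivide array → Pre_evenDivide array →
    Spec_evenDivide array (evenDivide array)

-- ===== LEMMAS AND PROOFS =====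

-- the per-pair contribution both programs sum
def pvG (x y : Int) : Int :=
  if x ≠ y ∧ PySem.Int.mod x y = 0 then PySem.Int.floordiv x y else 0

-- Σ_{a ∈ u} (if a = x then h a else 0) = h x, for nodup u containing x
lemma sum_ite_eq_of_nodup (h : Int → Int) (x : Int) :
    ∀ (u : List Int), u.Nodup → x ∈ u →
      (u.map (fun a => if a = x then h a else 0)).sum = h x := by
  intro u hnd hx
  induction u with
  | nil => simp at hx
  | cons a u ih =>
    simp only [List.map_cons, List.sum_cons]
    rcases List.nodup_cons.mp hnd with ⟨hau, hnd'⟩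
    by_cases hax : a = x
    · subst hax
      have : ∀ b ∈ u, (if b = a then h b else 0) = (0 : Int) := by
        intro b hb
        have : b ≠ a := fun e => hau (e ▸ hb)
        simp [this]
      rw [if_pos rfl, List.map_congr_left this]
      simp
    · have hxu : x ∈ u := by
        rcases List.mem_cons.mp hx with h1 | h1
        · exact absurd h1.symm hax
        · exact h1
      rw [if_neg hax, ih hnd' hxu]; ring

-- sum over a list = count-weighted sum over any nodup superset of its elements
lemma sum_count_nodup (h : Int → Int) :
    ∀ (s u : List Int), u.Nodup → (∀ x ∈ s, x ∈ u) →
      (s.map h).sum = (u.map (fun a => (s.count a : Int) * h a)).sum := by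
  intro s
  induction s with
  | nil => intro u _ _; simp
  | cons x s ih =>
    intro u hnd hsub
    have hx : x ∈ u := hsub x (List.mem_cons_self)
    have hsub' : ∀ y ∈ s, y ∈ u := fun y hy => hsub y (List.mem_cons_of_mem _ hy)
    have step : ∀ a ∈ u, ((List.count a (x :: s) : Int) * h a)
        = (List.count a s : Int) * h a + (if a = x then h a else 0) := by
      intro a _
      rw [List.count_cons]
      by_cases hax : a = x
      · simp [hax]; ring
      · simp [hax]; exact Or.inl fun e => hax e.symm
    calc ((x :: s).map h).sum = h x + (s.map h).sum := by simp
      _ = (u.map (fun a => (List.count a s : Int) * h a)).sum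
            + (u.map (fun a => if a = x then h a else 0)).sum := by
            rw [ih u hnd hsub', sum_ite_eq_of_nodup h x u hnd hx]; ring
      _ = (u.map (fun a => (List.count a (x :: s) : Int) * h a)).sum := by
            rw [List.map_congr_left step, PySem.List.sum_map_add_int]

-- the all-pairs row sum equals the counter-weighted row sum
lemma row_eq (s : List Int) :
    (s.map (fun x => (s.map (fun y => pvG x y)).sum)).sum
      = (((PySem.Dict.counter s).items).map (fun p =>
          (((PySem.Dict.counter s).items).map (fun q =>
            if p.1 ≠ q.1 ∧ PySem.Int.mod p.1 q.1 = 0 then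
              PySem.Int.floordiv p.1 q.1 * p.2 * q.2
            else 0)).sum)).sum := by
  rw [PySem.Dict.items_counter]
  simp only [List.map_map, Function.comp_def]
  have hnd := PySem.Set.nodup_ofList s
  have hmem : ∀ x ∈ s, x ∈ PySem.Set.ofList s := fun x hx => (PySem.Set.mem_ofList s x).mpr hx
  rw [sum_count_nodup (fun x => (s.map (fun y => pvG x y)).sum) s _ hnd hmem]
  refine congrArg List.sum (List.map_congr_left ?_)
  intro a _
  rw [sum_count_nodup (fun y => pvG a y) s _ hnd hmem]
  rw [← List.sum_map_mul_left (PySem.Set.ofList s)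
        (fun b => (List.count b s : Int) * pvG a b) ((List.count a s : Int))]
  refine congrArg List.sum (List.map_congr_left ?_)
  intro b _
  simp only [pvG]
  split_ifs with h
  · ring
  · ring

-- A's innermost index loop, as a filtered map
lemma innerA (s : List Int) (x : Int) (d : List Int) :
    (PySem.List.pyRange 0 (s.length : Int) 1).foldl (fun div j =>
        if x ≠ PySem.List.pyGetD s j 0 ∧
           PySem.Int.mod x (PySem.List.pyGetD s j 0) = 0 then
          div ++ [PySem.Int.floordiv x (PySem.List.pyGetD s j 0)]
        else div) d
      = d ++ (s.filter (fun y => decide (x ≠ y ∧ PySem.Int.mod x y = 0))).map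
          (fun y => PySem.Int.floordiv x y) := by
  rw [PySem.List.foldl_pyRange_zero_pyGetD' s 0
      (fun div y => if x ≠ y ∧ PySem.Int.mod x y = 0 then
          div ++ [PySem.Int.floordiv x y] else div) d]
  exact PySem.List.foldl_append_ite _ _ s d

lemma sum_filter_pvG (x : Int) (s : List Int) :
    (((s.filter (fun y => decide (x ≠ y ∧ PySem.Int.mod x y = 0))).map
        (fun y => PySem.Int.floordiv x y)).sum)
      = (s.map (fun y => pvG x y)).sum := by
  induction s with
  | nil => simp
  | cons y s ih =>
    rw [List.filter_cons]
    by_cases h : x ≠ y ∧ PySem.Int.mod x y = 0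
    · rw [if_pos (by simp [h])]
      simp only [List.map_cons, List.sum_cons, ih, pvG]
      rw [if_pos h]
    · rw [if_neg (by simp [h])]
      simp only [List.map_cons, List.sum_cons, ih, pvG]
      rw [if_neg h]; ring

-- A's value as a sum over all (value, value) pairs of each row
lemma evenDivide_eq_sum (array : List (List Int)) :
    evenDivide array
      = (array.map (fun s => (s.map (fun x => (s.map (fun y => pvG x y)).sum)).sum)).sum := by
  unfold evenDivide
  rw [PySem.List.foldl_congr_mem array _
      (fun div subarr => div ++ subarr.flatMap (fun x =>
        (subarr.filter (fun y => decide (x ≠ y ∧ PySem.Int.mod x y = 0))).map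
          (fun y => PySem.Int.floordiv x y))) []
      (by
        intro d s _
        rw [PySem.List.foldl_congr_mem s _
            (fun div x => div ++ (s.filter (fun y => decide (x ≠ y ∧ PySem.Int.mod x y = 0))).map
              (fun y => PySem.Int.floordiv x y)) d
            (by intro d' x _; exact innerA s x d')]
        exact PySem.List.foldl_append_eq_flatMap _ s d)]
  rw [PySem.List.foldl_append_eq_flatMap]
  simp only [List.nil_append, List.flatMap_def, List.sum_flatten, List.map_map, Function.comp_def]
  refine congrArg List.sum (List.map_congr_left ?_)
  intro s _
  exact congrArg List.sum (List.map_congr_left (fun x _ => sum_filter_pvG x s))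

-- B's nested item loops, as a sum of sums
lemma pairfold (items : List (Int × Int)) (t : Int) :
    items.foldl (fun total p =>
      items.foldl (fun total q =>
        if p.1 ≠ q.1 ∧ PySem.Int.mod p.1 q.1 = 0 then
          total + PySem.Int.floordiv p.1 q.1 * p.2 * q.2
        else total) total) t
      = t + (items.map (fun p => (items.map (fun q =>
          if p.1 ≠ q.1 ∧ PySem.Int.mod p.1 q.1 = 0 then
            PySem.Int.floordiv p.1 q.1 * p.2 * q.2
          else 0)).sum)).sum := by
  rw [PySem.List.foldl_congr_mem items _
      (fun total p => total + (items.map (fun q =>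
          if p.1 ≠ q.1 ∧ PySem.Int.mod p.1 q.1 = 0 then
            PySem.Int.floordiv p.1 q.1 * p.2 * q.2
          else 0)).sum) t
      (by
        intro acc p _
        rw [PySem.List.foldl_congr_mem items _
            (fun total q => total + (if p.1 ≠ q.1 ∧ PySem.Int.mod p.1 q.1 = 0 then
              PySem.Int.floordiv p.1 q.1 * p.2 * q.2 else 0)) acc
            (by intro a q _; split_ifs with h <;> simp [h])]
        exact PySem.List.foldl_add items _ acc)]
  exact PySem.List.foldl_add items _ t

-- B's value as a sum over pairs of counter items of each row
lemma evenDivide_alt_eq_sum (array : List (List Int)) :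
    evenDivide_alt array
      = (array.map (fun s =>
          (((PySem.Dict.counter s).items).map (fun p =>
            (((PySem.Dict.counter s).items).map (fun q =>
              if p.1 ≠ q.1 ∧ PySem.Int.mod p.1 q.1 = 0 then
                PySem.Int.floordiv p.1 q.1 * p.2 * q.2
              else 0)).sum)).sum)).sum := by
  unfold evenDivide_alt
  simp only [PySem.Dict.foldl_insert_getD_add_one_eq_counter]
  rw [PySem.List.foldl_congr_mem array _
      (fun total s => total +
        (((PySem.Dict.counter s).items).map (fun p =>
          (((PySem.Dict.counter s).items).map (fun q =>
            if p.1 ≠ q.1 ∧ PySem.Int.mod p.1 q.1 = 0 then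
              PySem.Int.floordiv p.1 q.1 * p.2 * q.2
            else 0)).sum)).sum) 0
      (by intro t s _; exact pairfold _ t)]
  rw [PySem.List.foldl_add]
  ring

-- ===== VERDICT (by name: the statement is the Claim_ definition above) =====
theorem evenDivide_spec : Claim_equal_evenDivide := by
  intro array _ _
  unfold Spec_evenDivide
  rw [evenDivide_eq_sum, evenDivide_alt_eq_sum]
  exact congrArg List.sum (List.map_congr_left (fun s _ => row_eq s))
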